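-- pv_equiv track=rewrite | github.com/andresculchac/EstructurasDeDatosUnal | semana3/sumaDePosiciones.py | sumarPosiciones
-- ===== SOURCE A (Python) =====
-- def sumarPosiciones(arreglo, consultas):
--     posiciones = {}
--     for i in range(len(arreglo)):
--         posiciones[arreglo[i]] = i + 1
--     total = 0
--     for x in consultas:
--         if x in posiciones:
--             total += posiciones[x]
--     return total
-- ===== SOURCE B (Python) =====
-- def sumarPosiciones(arreglo, consultas):
--     cnt = {}
--     for x in consultas:
--         cnt[x] = cnt.get(x, 0) + 1
--     pos = {v: i + 1 for i, v in enumerate(arreglo)}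
--     return sum(p * cnt.get(v, 0) for v, p in pos.items())
-- ===== Notes on version B (the rewrite author's own statement) =====
-- stated objective: alternative
-- what changed: Instead of looping over every query and looking up its position, B aggregates the queries into a count dict once and computes one sum of position * query-count over the distinct array values, preserving last-occurrence semantics.
import Mathlib
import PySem

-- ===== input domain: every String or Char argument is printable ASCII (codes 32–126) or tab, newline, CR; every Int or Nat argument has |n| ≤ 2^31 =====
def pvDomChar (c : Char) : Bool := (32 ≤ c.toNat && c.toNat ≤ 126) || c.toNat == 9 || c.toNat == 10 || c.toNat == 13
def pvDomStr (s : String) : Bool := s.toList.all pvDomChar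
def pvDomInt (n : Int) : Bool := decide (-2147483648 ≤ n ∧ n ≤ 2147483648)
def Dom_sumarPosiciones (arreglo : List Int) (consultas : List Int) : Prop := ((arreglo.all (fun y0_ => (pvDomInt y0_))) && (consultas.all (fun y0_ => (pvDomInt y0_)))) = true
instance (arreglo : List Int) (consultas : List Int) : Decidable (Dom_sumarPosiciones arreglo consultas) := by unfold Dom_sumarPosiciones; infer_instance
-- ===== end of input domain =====

-- B replaces A's per-query position lookups by one count dict over the queries and a single
-- sum of position * query-count over the distinct array values (objective: alternative).

-- ===== PORT A =====
def sumarPosiciones (arreglo : List Int) (consultas : List Int) : Int :=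
  let posiciones := (PySem.List.pyRange 0 (PySem.List.len arreglo) 1).foldl
      (fun d i => d.insert (PySem.List.pyGetD arreglo i 0) (i + 1)) PySem.Dict.empty
  consultas.foldl
    (fun total x => if posiciones.contains x then total + posiciones.getD x 0 else total) 0

-- ===== PORT B =====
def sumarPosiciones_alt (arreglo : List Int) (consultas : List Int) : Int :=
  let cnt := consultas.foldl (fun d x => d.insert x (d.getD x 0 + 1)) PySem.Dict.empty
  let pos := (PySem.List.enumerate arreglo 0).foldl
      (fun d iv => d.insert iv.2 (iv.1 + 1)) PySem.Dict.empty
  (pos.items.map (fun vp => vp.2 * cnt.getD vp.1 0)).sum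

-- ===== PRECONDITION & SPEC =====
def Spec_sumarPosiciones (arreglo : List Int) (consultas : List Int) (out : Int) : Prop := out = sumarPosiciones_alt arreglo consultas
instance (arreglo : List Int) (consultas : List Int) (out : Int) : Decidable (Spec_sumarPosiciones arreglo consultas out) := by unfold Spec_sumarPosiciones; infer_instance

-- ===== CLAIM (what is proved, stated in full; the proofs are below) =====
def Claim_equal_sumarPosiciones : Prop := ∀ (arreglo : List Int) (consultas : List Int), Dom_sumarPosiciones arreglo consultas → Spec_sumarPosiciones arreglo consultas (sumarPosiciones arreglo consultas)

-- ===== LEMMAS AND PROOFS =====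

-- a sum of (if key == x then value else 0) over pairs whose keys avoid x is 0
lemma sum_ite_not_mem (x : Int) (ps : List (Int × Int)) (h : x ∉ ps.map Prod.fst) :
    (ps.map (fun vp => if vp.1 == x then vp.2 else 0)).sum = 0 := by
  apply List.sum_eq_zero
  intro y hy
  obtain ⟨vp, hvp, rfl⟩ := List.mem_map.mp hy
  have : vp.1 ≠ x := fun hx => h (List.mem_map.mpr ⟨vp, hvp, hx⟩)
  simp [this]

-- picking the unique matching pair out of a nodup association list is getD
lemma sum_ite_eq_getD (x : Int) : ∀ (ps : List (Int × Int)), (ps.map Prod.fst).Nodup →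
    (ps.map (fun vp => if vp.1 == x then vp.2 else 0)).sum = (PySem.Dict.mk ps).getD x 0 := by
  intro ps
  induction ps with
  | nil => intro _; simp [PySem.Dict.getD, PySem.Dict.get?]
  | cons kv rest ih =>
    intro hnd
    simp only [List.map_cons, List.nodup_cons] at hnd
    rw [List.map_cons, List.sum_cons, PySem.Dict.getD_eq_get?_getD,
        PySem.Dict.get?_mk_cons (k := kv.1) (v := kv.2)]
    by_cases hkx : kv.1 = x
    · subst hkx
      rw [sum_ite_not_mem kv.1 rest hnd.1]
      simp
    · have : (kv.1 == x) = false := by simp [hkx]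
      rw [this]
      rw [ih hnd.2, PySem.Dict.getD_eq_get?_getD]
      simp

-- per-query summation over l equals aggregated (value, position) * count summation
lemma sum_getD_eq_sum_items (d : PySem.Dict Int Int) (hnd : d.keys.Nodup) :
    ∀ (l : List Int),
    (l.map (fun x => d.getD x 0)).sum
      = (d.items.map (fun vp => vp.2 * (l.count vp.1 : Int))).sum := by
  intro l
  induction l with
  | nil => simp
  | cons x l ih =>
    rw [List.map_cons, List.sum_cons, ih]
    have hmk : PySem.Dict.mk d.items = d := rfl
    have hx : (d.items.map (fun vp => if vp.1 == x then vp.2 else 0)).sum = d.getD x 0 := by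
      rw [sum_ite_eq_getD x d.items hnd, hmk]
    calc d.getD x 0 + (d.items.map (fun vp => vp.2 * (l.count vp.1 : Int))).sum
        = (d.items.map (fun vp => if vp.1 == x then vp.2 else 0)).sum
          + (d.items.map (fun vp => vp.2 * (l.count vp.1 : Int))).sum := by rw [hx]
      _ = (d.items.map (fun vp => (if vp.1 == x then vp.2 else 0) + vp.2 * (l.count vp.1 : Int))).sum := by
          rw [← List.sum_map_add]
      _ = (d.items.map (fun vp => vp.2 * ((x :: l).count vp.1 : Int))).sum := by
          apply congrArg
          apply List.map_congr_left
          intro vp _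
          rw [List.count_cons]
          push_cast
          by_cases hvx : vp.1 = x
          · simp [hvx, mul_add]; ring
          · have h1 : (vp.1 == x) = false := by simp [hvx]
            have h2 : ¬ x = vp.1 := fun h => hvx h.symm
            simp [h1, h2]

-- ===== VERDICT (by name: the statement is the Claim_ definition above) =====
theorem sumarPosiciones_spec : Claim_equal_sumarPosiciones := by
  intro arreglo consultas _
  unfold Spec_sumarPosiciones sumarPosiciones sumarPosiciones_alt
  simp only []
  -- the position dict is the same in both programs
  rw [PySem.List.enumerate_eq_map_pyRange (d := 0), List.foldl_map]
  set P := (PySem.List.pyRange 0 (PySem.List.len arreglo) 1).foldl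
      (fun d i => d.insert (PySem.List.pyGetD arreglo i 0) (i + 1)) PySem.Dict.empty with hP
  have hndP : P.keys.Nodup := by
    rw [hP]
    exact PySem.Dict.nodup_keys_foldl_insert_key _ _ _ _ PySem.Dict.nodup_keys_empty
  -- A's loop: the guarded add is an unconditional add of getD
  have hbody : ∀ (acc : Int) (x : Int), x ∈ consultas →
      (if P.contains x then acc + P.getD x 0 else acc) = acc + P.getD x 0 := by
    intro acc x _
    by_cases h : P.contains x
    · simp [h]
    · have h0 : P.getD x 0 = 0 := PySem.Dict.getD_of_not_contains P 0 (by simp_all)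
      simp [h, h0]
  have hA : consultas.foldl
      (fun total x => if P.contains x then total + P.getD x 0 else total) 0
      = (consultas.map (fun x => P.getD x 0)).sum := by
    rw [PySem.List.foldl_congr_mem consultas _ _ 0 (fun acc x hx => hbody acc x hx),
        PySem.List.foldl_add]
    simp
  rw [hA, PySem.Dict.foldl_insert_getD_add_one_eq_counter]
  rw [sum_getD_eq_sum_items P hndP consultas]
  apply congrArg
  apply List.map_congr_left
  intro vp _
  rw [PySem.Dict.getD_counter]
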